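-- pv_equiv track=rewrite | github.com/hugo-palafox/ads-mcp-agent-local | agent/teaching.py | resolve_alias_target
-- ===== SOURCE A (Python) =====
-- def resolve_alias_target(target_query: str, known_targets: list[str]) -> tuple[str | None, list[str]]:
--     clean_query = target_query.strip()
--     if not clean_query:
--         return None, []
--     low_query = clean_query.lower()
--     exact = [item for item in known_targets if isinstance(item, str) and item.lower() == low_query]
--     if len(exact) == 1:
--         return exact[0], []
--     if len(exact) > 1:
--         return None, exact
--     suffix = [
--         item
--         for item in known_targets
--         if isinstance(item, str) and item.lower().endswith(f".{low_query}")
--     ]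
--     if len(suffix) == 1:
--         return suffix[0], []
--     if len(suffix) > 1:
--         return None, suffix
--     return None, []
-- ===== SOURCE B (Python) =====
-- def resolve_alias_target(target_query: str, known_targets: list[str]) -> tuple[str | None, list[str]]:
--     low_query = target_query.strip().lower()
--     if not low_query:
--         return None, []
--     dot = "." + low_query
--
--     def rank(item):
--         if not isinstance(item, str):
--             return 2
--         low = item.lower()
--         if low == low_query:
--             return 0
--         if low.endswith(dot):
--             return 1
--         return 2
--
--     # single best-so-far (argmin with ties) scan: keep the items of the best rank seen
--     best, matches = 2, []
--     for item in known_targets: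
--         r = rank(item)
--         if r < best:
--             best, matches = r, [item]
--         elif r == best and r < 2:
--             matches.append(item)
--     return (matches[0], []) if len(matches) == 1 else (None, matches)
-- ===== Notes on version B (the rewrite author's own statement) =====
-- stated objective: faster
-- what changed: B replaces A's staged pipeline (filter exacts, cascade, then a second full scan with a per-item f-string for suffix matches, cascade again) by a single argmin-with-ties scan: each item gets a rank (0 exact, 1 dotted-suffix, 2 none) against a precomputed '.'+query, one pass keeps the items of the best rank seen so far, and one uniform decision replaces A's four-way tier cascade.
import Mathlib
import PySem

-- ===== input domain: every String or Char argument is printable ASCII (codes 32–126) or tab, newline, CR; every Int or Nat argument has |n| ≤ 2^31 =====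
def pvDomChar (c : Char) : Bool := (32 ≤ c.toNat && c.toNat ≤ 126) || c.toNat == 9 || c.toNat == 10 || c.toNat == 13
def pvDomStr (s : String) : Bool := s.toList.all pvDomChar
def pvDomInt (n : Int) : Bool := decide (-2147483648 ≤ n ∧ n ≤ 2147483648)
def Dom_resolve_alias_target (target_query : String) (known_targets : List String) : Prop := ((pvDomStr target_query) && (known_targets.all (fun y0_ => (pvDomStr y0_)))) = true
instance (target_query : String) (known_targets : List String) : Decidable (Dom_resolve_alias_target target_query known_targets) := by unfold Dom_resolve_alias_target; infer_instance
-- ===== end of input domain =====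

-- B replaces A's staged filter-then-cascade by a single best-rank-so-far (argmin with
-- ties) scan over known_targets with one uniform final decision (objective: faster; measured).


-- ===== PORT A =====
def resolve_alias_target (target_query : String) (known_targets : List String) : Option String × List String :=
  let clean_query := PySem.Str.strip target_query
  if clean_query = "" then (none, [])
  else
    let low_query := PySem.Str.lower clean_query
    let exact := known_targets.filter (fun item => PySem.Str.lower item == low_query)
    if exact.length = 1 then (exact.head?, [])
    else if exact.length > 1 then (none, exact)
    else
      let suffix := known_targets.filter
        (fun item => PySem.Str.endswith (PySem.Str.lower item) ("." ++ low_query))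
      if suffix.length = 1 then (suffix.head?, [])
      else if suffix.length > 1 then (none, suffix)
      else (none, [])

-- ===== PORT B =====
-- B's rank: 0 = exact match, 1 = dotted-suffix match, 2 = no match
def pvRank (q : String) (item : String) : Nat :=
  let low := PySem.Str.lower item
  if low = q then 0
  else if PySem.Str.endswith low ("." ++ q) then 1
  else 2

-- one step of B's best-so-far scan: strictly better rank resets, equal matching rank appends
def pvStep (q : String) (st : Nat × List String) (item : String) : Nat × List String :=
  let r := pvRank q item
  if r < st.1 then (r, [item])
  else if r = st.1 ∧ r < 2 then (st.1, st.2 ++ [item])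
  else st

def resolve_alias_target_alt (target_query : String) (known_targets : List String) : Option String × List String :=
  let low_query := PySem.Str.lower (PySem.Str.strip target_query)
  if low_query = "" then (none, [])
  else
    let st := known_targets.foldl (pvStep low_query) (2, [])
    if st.2.length = 1 then (st.2.head?, []) else (none, st.2)

-- ===== PRECONDITION & SPEC =====
def Spec_resolve_alias_target (target_query : String) (known_targets : List String) (out : Option String × List String) : Prop := out = resolve_alias_target_alt target_query known_targets
instance (target_query : String) (known_targets : List String) (out : Option String × List String) : Decidable (Spec_resolve_alias_target target_query known_targets out) := by unfold Spec_resolve_alias_target; infer_instance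

-- ===== CLAIM (what is proved, stated in full; the proofs are below) =====
def Claim_equal_resolve_alias_target : Prop := ∀ (target_query : String) (known_targets : List String), Dom_resolve_alias_target target_query known_targets → Spec_resolve_alias_target target_query known_targets (resolve_alias_target target_query known_targets)

-- ===== LEMMAS AND PROOFS =====

-- lower preserves emptiness (lower maps characters one-for-one)
theorem pv_lower_eq_empty_iff (s : String) : PySem.Str.lower s = "" ↔ s = "" := by
  constructor
  · intro h
    have h2 := congrArg String.toList h
    simpa [PySem.Str.toList_lower, PySem.Chars.lower] using h2
  · intro h; subst h; rfl

-- a string never ends with a strictly longer string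
theorem pv_not_endswith_dot_self (q : List Char) :
    PySem.Chars.endswith q ('.' :: q) = false := by
  by_contra h
  rw [Bool.not_eq_false] at h
  have hsuf : ('.' :: q) <:+ q := (PySem.Chars.endswith_iff q _).mp h
  have := hsuf.length_le
  simp at this

-- A's exact / (rank-1) suffix predicates
def pvExactP (q : String) (item : String) : Bool := PySem.Str.lower item == q
def pvSuffP (q : String) (item : String) : Bool :=
  !(PySem.Str.lower item == q) && PySem.Str.endswith (PySem.Str.lower item) ("." ++ q)

theorem pv_rank0_iff (q item : String) : pvRank q item = 0 ↔ pvExactP q item = true := by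
  simp only [pvRank, pvExactP]; split_ifs <;> simp_all

theorem pv_rank1_iff (q item : String) : pvRank q item = 1 ↔ pvSuffP q item = true := by
  simp only [pvRank, pvSuffP]; split_ifs <;> simp_all

-- from best rank 0, the scan appends exactly the exact matches
theorem pv_fold0 (q : String) (xs : List String) (m : List String) :
    xs.foldl (pvStep q) (0, m) = (0, m ++ xs.filter (pvExactP q)) := by
  induction xs generalizing m with
  | nil => simp
  | cons x xs ih =>
    rw [List.foldl_cons]
    by_cases h0 : pvRank q x = 0
    · rw [show pvStep q (0, m) x = (0, m ++ [x]) from by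
        simp [pvStep, h0], ih]
      simp [(pv_rank0_iff q x).mp h0]
    · have hne : pvExactP q x ≠ true := fun hc => h0 ((pv_rank0_iff q x).mpr hc)
      rw [show pvStep q (0, m) x = (0, m) from by
        simp only [pvStep]; have : ¬ pvRank q x < 0 := by omega
        simp [this, h0], ih]
      simp [hne]

-- from best rank 1, the scan yields full exacts if any, else appends the rank-1 suffixes
theorem pv_fold1 (q : String) (xs : List String) (m : List String) :
    xs.foldl (pvStep q) (1, m) =
      if xs.filter (pvExactP q) = [] then (1, m ++ xs.filter (pvSuffP q))
      else (0, xs.filter (pvExactP q)) := by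
  induction xs generalizing m with
  | nil => simp
  | cons x xs ih =>
    rw [List.foldl_cons]
    by_cases h0 : pvRank q x = 0
    · rw [show pvStep q (1, m) x = (0, [x]) from by simp [pvStep, h0], pv_fold0]
      have he := (pv_rank0_iff q x).mp h0
      simp [he]
    · have hne : pvExactP q x ≠ true := fun hc => h0 ((pv_rank0_iff q x).mpr hc)
      by_cases h1 : pvRank q x = 1
      · rw [show pvStep q (1, m) x = (1, m ++ [x]) from by
          simp only [pvStep, h1]; simp, ih]
        simp [hne, (pv_rank1_iff q x).mp h1]
      · have hns : pvSuffP q x ≠ true := fun hc => h1 ((pv_rank1_iff q x).mpr hc)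
        have h2 : pvRank q x = 2 := by
          simp only [pvRank] at *; split_ifs at * <;> simp_all
        rw [show pvStep q (1, m) x = (1, m) from by
          simp only [pvStep, h2]; simp, ih]
        simp [hne, hns]

-- the whole scan from the initial state (2, [])
theorem pv_fold2 (q : String) (xs : List String) :
    xs.foldl (pvStep q) (2, []) =
      if xs.filter (pvExactP q) = [] then
        (if xs.filter (pvSuffP q) = [] then (2, []) else (1, xs.filter (pvSuffP q)))
      else (0, xs.filter (pvExactP q)) := by
  induction xs with
  | nil => simp
  | cons x xs ih =>
    rw [List.foldl_cons]
    by_cases h0 : pvRank q x = 0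
    · rw [show pvStep q (2, []) x = (0, [x]) from by simp [pvStep, h0], pv_fold0]
      simp [(pv_rank0_iff q x).mp h0]
    · have hne : pvExactP q x ≠ true := fun hc => h0 ((pv_rank0_iff q x).mpr hc)
      by_cases h1 : pvRank q x = 1
      · rw [show pvStep q (2, []) x = (1, [x]) from by simp [pvStep, h1], pv_fold1]
        simp [hne, (pv_rank1_iff q x).mp h1]
      · have hns : pvSuffP q x ≠ true := fun hc => h1 ((pv_rank1_iff q x).mpr hc)
        have h2 : pvRank q x = 2 := by
          simp only [pvRank] at *; split_ifs at * <;> simp_all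
        rw [show pvStep q (2, []) x = (2, []) from by
          simp only [pvStep, h2]; simp, ih]
        simp [hne, hns]

-- the rank-1 suffix filter equals A's plain suffix filter (an exact match never has the suffix)
theorem pv_suffix_filter_eq (q : String) (ks : List String) :
    ks.filter (pvSuffP q)
    = ks.filter (fun item => PySem.Str.endswith (PySem.Str.lower item) ("." ++ q)) := by
  apply List.filter_congr
  intro x _
  by_cases hx : PySem.Str.lower x = q
  · have hns : PySem.Chars.endswith q.toList ('.' :: q.toList) = false :=
      pv_not_endswith_dot_self q.toList
    simp [pvSuffP, hx, hns]
  · simp [pvSuffP, hx]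

theorem resolve_alias_target_spec : Claim_equal_resolve_alias_target := by
  intro tq ks _
  unfold Spec_resolve_alias_target resolve_alias_target resolve_alias_target_alt
  by_cases hq : PySem.Str.strip tq = ""
  · have hq2 : PySem.Str.lower (PySem.Str.strip tq) = "" :=
      (pv_lower_eq_empty_iff _).mpr hq
    rw [if_pos hq, if_pos hq2]
  · have hq' : ¬ PySem.Str.lower (PySem.Str.strip tq) = "" := by
      intro h; exact hq ((pv_lower_eq_empty_iff _).mp h)
    rw [if_neg hq, if_neg hq']
    simp only [pv_fold2, pv_suffix_filter_eq]
    set low := PySem.Str.lower (PySem.Str.strip tq)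
    set E := ks.filter (fun item => PySem.Str.lower item == low) with hE
    have hEE : ks.filter (pvExactP low) = E := rfl
    set S := ks.filter (fun item => PySem.Str.endswith (PySem.Str.lower item) ("." ++ low)) with hS
    rw [hEE]
    by_cases hE0 : E = []
    · by_cases hS0 : S = []
      · simp [hE0, hS0]
      · have hSlen : S.length ≠ 0 := by simpa using hS0
        by_cases hS1 : S.length = 1
        · simp [hE0, hS0, hS1]
        · have : S.length > 1 := by omega
          simp [hE0, hS0, hS1, this]
    · have hElen : E.length ≠ 0 := by simpa using hE0
      by_cases hE1 : E.length = 1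
      · simp [hE0, hE1]
      · have : E.length > 1 := by omega
        simp [hE0, hE1, this]
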